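-- pv_equiv track=rewrite | github.com/pchanial/pyoperators | pyoperators/core.py | _get_bufsizes
-- ===== SOURCE A (Python) =====
-- def _get_bufsizes(sizes, ninplaces):
--     bufsizes = []
--     iop = 0
--     for n in ninplaces[:-1]:
--         bufsizes.append(max(sizes[iop:iop+n+1]))
--         iop += n + 1
--     bufsizes.append(sizes[-1])
--     return bufsizes
-- ===== SOURCE B (Python) =====
-- def _get_bufsizes(sizes, ninplaces):
--     groups = ninplaces[:-1]
--     starts = [sum(m + 1 for m in groups[:i]) for i in range(len(groups))]
--     return [max(sizes[s:s + n + 1]) for s, n in zip(starts, groups)] + [sizes[-1]]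
-- ===== Notes on version B (the rewrite author's own statement) =====
-- stated objective: alternative
-- what changed: Replaces A's single pass threading a running pointer through an accumulator list by a two-phase structure: first a table of group start offsets computed as closed-form prefix sums, then a comprehension mapping max over each precomputed slice, with sizes[-1] appended as the last entry.
import Mathlib
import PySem

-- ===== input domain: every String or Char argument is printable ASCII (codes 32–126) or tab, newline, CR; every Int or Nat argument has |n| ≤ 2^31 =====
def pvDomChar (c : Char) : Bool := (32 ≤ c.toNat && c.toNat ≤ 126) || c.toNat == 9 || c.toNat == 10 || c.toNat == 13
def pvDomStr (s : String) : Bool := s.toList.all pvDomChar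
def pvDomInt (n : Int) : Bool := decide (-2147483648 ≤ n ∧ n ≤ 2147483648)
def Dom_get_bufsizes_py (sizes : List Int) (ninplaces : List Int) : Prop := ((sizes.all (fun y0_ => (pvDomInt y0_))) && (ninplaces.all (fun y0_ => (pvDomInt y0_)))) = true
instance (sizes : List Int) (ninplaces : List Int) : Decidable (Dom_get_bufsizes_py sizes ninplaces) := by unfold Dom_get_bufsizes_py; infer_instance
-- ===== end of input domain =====

-- B replaces A's single pass with a running pointer by a two-phase structure (a table of
-- closed-form prefix-sum start offsets, then a map of max over each precomputed slice);
-- objective: alternative decomposition, same cost class.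

-- ===== PORT A =====
-- literal port of A: accumulator list + running pointer iop threaded through one fold;
-- max() of an empty slice (ValueError) and sizes[-1] on [] (IndexError) are excluded by
-- Pre_get_bufsizes_py, so the .getD 0 defaults are unreachable under the claim.
def get_bufsizes_py (sizes : List Int) (ninplaces : List Int) : List Int :=
  let r := (PySem.List.slice ninplaces none (some (-1))).foldl
    (fun (st : List Int × Int) n =>
      (st.1 ++ [((PySem.List.slice sizes (some st.2) (some (st.2 + n + 1))).max?).getD 0],
       st.2 + n + 1)) ([], 0)
  r.1 ++ [((PySem.List.pyGet? sizes (-1)).getD 0)]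

-- ===== PORT B =====
-- literal port of Source B: groups = ninplaces[:-1]; starts[i] = sum(m+1 for m in groups[:i]);
-- then [max(sizes[s:s+n+1]) for s, n in zip(starts, groups)] + [sizes[-1]].
def get_bufsizes_py_alt (sizes : List Int) (ninplaces : List Int) : List Int :=
  let groups := PySem.List.slice ninplaces none (some (-1))
  let starts := (List.range groups.length).map
    (fun (i : Nat) => ((PySem.List.slice groups none (some (i : Int))).map (· + 1)).sum)
  ((starts.zip groups).map
    (fun p => ((PySem.List.slice sizes (some p.1) (some (p.1 + p.2 + 1))).max?).getD 0))
    ++ [((PySem.List.pyGet? sizes (-1)).getD 0)]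

-- ===== PRECONDITION & SPEC =====
-- Pre_ holds exactly where Python A returns: sizes is nonempty (else sizes[-1] raises
-- IndexError) and every slice A takes a max over is nonempty (else max raises ValueError).
def Pre_get_bufsizes_py (sizes : List Int) (ninplaces : List Int) : Prop :=
  sizes ≠ [] ∧ ∀ i ∈ List.range ninplaces.dropLast.length,
    PySem.List.slice sizes
      (some (((ninplaces.dropLast.take i).map (· + 1)).sum))
      (some (((ninplaces.dropLast.take i).map (· + 1)).sum + ninplaces.dropLast.getD i 0 + 1))
      ≠ []
instance (sizes : List Int) (ninplaces : List Int) : Decidable (Pre_get_bufsizes_py sizes ninplaces) := by unfold Pre_get_bufsizes_py; infer_instance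

def pvWitness_get_bufsizes_py : List Int × List Int := ([1, 5, 2, 7, 3], [1, 1, 0])

def Spec_get_bufsizes_py (sizes : List Int) (ninplaces : List Int) (out : List Int) : Prop := out = get_bufsizes_py_alt sizes ninplaces
instance (sizes : List Int) (ninplaces : List Int) (out : List Int) : Decidable (Spec_get_bufsizes_py sizes ninplaces out) := by unfold Spec_get_bufsizes_py; infer_instance

-- ===== CLAIM (what is proved, stated in full; the proofs are below) =====
def Claim_equal_get_bufsizes_py : Prop := ∀ (sizes : List Int) (ninplaces : List Int), Dom_get_bufsizes_py sizes ninplaces → Pre_get_bufsizes_py sizes ninplaces → Spec_get_bufsizes_py sizes ninplaces (get_bufsizes_py sizes ninplaces)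

-- ===== LEMMAS AND PROOFS =====

-- the common value both sides compute for the per-group maxima, as a structural recursion
def pvGB (sizes : List Int) : Int → List Int → List Int
  | _, [] => []
  | s, n :: t =>
      ((PySem.List.slice sizes (some s) (some (s + n + 1))).max?).getD 0 :: pvGB sizes (s + n + 1) t

theorem pvGB_foldlA (sizes : List Int) :
    ∀ (g acc : List Int) (s : Int),
      (g.foldl (fun (st : List Int × Int) n =>
        (st.1 ++ [((PySem.List.slice sizes (some st.2) (some (st.2 + n + 1))).max?).getD 0],
         st.2 + n + 1)) (acc, s)).1 = acc ++ pvGB sizes s g := by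
  intro g
  induction g with
  | nil => intro acc s; simp [pvGB]
  | cons n t ih =>
      intro acc s
      simp only [List.foldl_cons, pvGB]
      rw [ih]
      simp

theorem pvGB_mapB (sizes : List Int) :
    ∀ (t : List Int) (c : Int),
      ((((List.range t.length).map
          (fun i => c + ((t.take i).map (· + 1)).sum)).zip t).map
        (fun p => ((PySem.List.slice sizes (some p.1) (some (p.1 + p.2 + 1))).max?).getD 0))
      = pvGB sizes c t := by
  intro t
  induction t with
  | nil => intro c; simp [pvGB]
  | cons n t ih =>
      intro c
      simp only [List.length_cons]
      rw [List.range_succ_eq_map]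
      simp only [List.map_cons, List.map_map, List.take_zero,
        List.zip_cons_cons, pvGB]
      refine congrArg₂ List.cons ?_ ?_
      · simp
      · rw [← ih (c + n + 1)]
        congr 1
        congr 1
        apply List.map_congr_left
        intro i _
        simp [Function.comp, List.take_succ_cons, List.map_cons, List.sum_cons]
        ring

-- ===== VERDICT (by name: the statement is the Claim_ definition above) =====
theorem get_bufsizes_py_spec : Claim_equal_get_bufsizes_py := by
  intro sizes ninplaces _ _
  unfold Spec_get_bufsizes_py get_bufsizes_py get_bufsizes_py_alt
  simp only [PySem.List.slice_to_neg_one, PySem.List.slice_to_natCast]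
  rw [pvGB_foldlA]
  have hb := pvGB_mapB sizes ninplaces.dropLast 0
  simp only [zero_add] at hb
  rw [hb]
  simp
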